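-- pv_equiv track=rewrite | github.com/ntokala/skin-detection | flask/skinny.py | structure
-- ===== SOURCE A (Python) =====
-- def structure(values):
--     r = []
--     g = []
--     b = []
--     for i in range(len(values)):
--         if i == 0 or i%3 == 0:
--             r.append(int(values[i]))
--             g.append(int(values[i+1]))
--             b.append(int(values[i+2]))
--
--     return r,g,b
-- ===== SOURCE B (Python) =====
-- def structure(values):
--     chunks = [values[i:i+3] for i in range(0, len(values), 3)]
--     r = [int(t[0]) for t in chunks]
--     g = [int(t[1]) for t in chunks]
--     b = [int(t[2]) for t in chunks]
--     return r, g, b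
-- ===== Notes on version B (the rewrite author's own statement) =====
-- stated objective: alternative
-- what changed: B first materialises the list of 3-element chunks with a stride-3 range and slicing, then extracts each channel in its own pass, instead of A's single index loop over every position with a modulo filter and absolute i+1/i+2 indexing.
import Mathlib
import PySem

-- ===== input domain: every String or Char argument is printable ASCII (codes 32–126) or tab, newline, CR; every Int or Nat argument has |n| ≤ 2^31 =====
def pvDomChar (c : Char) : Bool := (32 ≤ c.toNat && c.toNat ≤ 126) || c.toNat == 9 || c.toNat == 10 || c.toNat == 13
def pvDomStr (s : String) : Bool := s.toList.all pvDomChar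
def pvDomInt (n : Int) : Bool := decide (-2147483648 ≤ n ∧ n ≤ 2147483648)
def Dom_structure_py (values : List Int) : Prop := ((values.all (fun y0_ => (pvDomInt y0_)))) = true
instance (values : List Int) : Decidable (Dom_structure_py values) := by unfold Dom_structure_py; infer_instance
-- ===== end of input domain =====

-- B materialises the 3-element chunks first, then reads each channel in its own pass;
-- A runs one loop over every index with a modulo test. Objective: alternative decomposition.

-- ===== PORT A =====
-- for i in range(len(values)): if i == 0 or i%3 == 0: append values[i], values[i+1], values[i+2]
-- (pyGetD only touches in-range indices under Pre_; outside Pre_ the Python raises IndexError)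
def structure_py (values : List Int) : List Int × List Int × List Int :=
  (PySem.List.pyRange 0 values.length 1).foldl
    (fun (acc : List Int × List Int × List Int) i =>
      if i == 0 || PySem.Int.mod i 3 == 0 then
        (acc.1 ++ [PySem.List.pyGetD values i 0],
         acc.2.1 ++ [PySem.List.pyGetD values (i + 1) 0],
         acc.2.2 ++ [PySem.List.pyGetD values (i + 2) 0])
      else acc)
    ([], [], [])

-- ===== PORT B =====
-- chunks = [values[i:i+3] for i in range(0, len(values), 3)]; then one pass per channel
def structure_py_alt (values : List Int) : List Int × List Int × List Int :=
  let chunks := (PySem.List.pyRange 0 values.length 3).map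
      (fun i => PySem.List.slice values (some i) (some (i + 3)))
  (chunks.map (fun t => PySem.List.pyGetD t 0 0),
   chunks.map (fun t => PySem.List.pyGetD t 1 0),
   chunks.map (fun t => PySem.List.pyGetD t 2 0))

-- ===== PRECONDITION & SPEC =====
-- Pre_ excludes lengths not divisible by 3: there the Python A (and B) raises IndexError
-- on the out-of-range access into the incomplete final triple.
def Pre_structure_py (values : List Int) : Prop := values.length % 3 = 0
instance (values : List Int) : Decidable (Pre_structure_py values) := by unfold Pre_structure_py; infer_instance
def pvWitness_structure_py : List Int := [1, 2, 3, 4, 5, 6]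
def Spec_structure_py (values : List Int) (out : List Int × List Int × List Int) : Prop := out = structure_py_alt values
instance (values : List Int) (out : List Int × List Int × List Int) : Decidable (Spec_structure_py values out) := by unfold Spec_structure_py; infer_instance

-- ===== CLAIM (what is proved, stated in full; the proofs are below) =====
def Claim_equal_structure_py : Prop := ∀ (values : List Int), Dom_structure_py values → Pre_structure_py values → Spec_structure_py values (structure_py values)

-- ===== LEMMAS AND PROOFS =====

-- the loop's test, for 0 ≤ i, is exactly divisibility by 3
theorem pv_test_iff (i : Int) (h : 0 ≤ i) :
    ((i == 0 || PySem.Int.mod i 3 == 0) = true) ↔ (3 : Int) ∣ i := by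
  rw [PySem.Int.mod_eq_emod_of_pos (by norm_num)]
  rw [Int.dvd_iff_emod_eq_zero]
  simp only [Bool.or_eq_true, beq_iff_eq]
  constructor
  · rintro (rfl | h) <;> simp [*]
  · intro h; right; exact h

-- filtering range(n) by the i%3==0 test gives range(0, n, 3)
theorem pv_filter_range (n : Int) :
    (PySem.List.pyRange 0 n 1).filter (fun i => i == 0 || PySem.Int.mod i 3 == 0)
      = PySem.List.pyRange 0 n 3 := by
  have h3 : (0:Int) < 3 := by norm_num
  have sorted1 : ((PySem.List.pyRange 0 n 1).filter
      (fun i => i == 0 || PySem.Int.mod i 3 == 0)).Pairwise (· < ·) :=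
    (PySem.List.pairwise_lt_pyRange_one 0 n).filter _
  have sorted3 : (PySem.List.pyRange 0 n 3).Pairwise (· < ·) := by
    rw [PySem.List.pyRange_of_pos 0 n h3]
    refine List.Pairwise.map _ (fun a b hab => hab) ?_
    exact List.pairwise_lt_range.imp (by omega)
  have hmem : ∀ x, x ∈ (PySem.List.pyRange 0 n 1).filter
      (fun i => i == 0 || PySem.Int.mod i 3 == 0) ↔ x ∈ PySem.List.pyRange 0 n 3 := by
    intro x
    rw [List.mem_filter, PySem.List.mem_pyRange_one,
      PySem.List.mem_pyRange_iff_of_pos h3]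
    constructor
    · rintro ⟨⟨h0, hx⟩, ht⟩
      exact ⟨h0, hx, by simpa using (pv_test_iff x h0).1 ht⟩
    · rintro ⟨h0, hx, hd⟩
      exact ⟨⟨h0, hx⟩, (pv_test_iff x h0).2 (by simpa using hd)⟩
  exact List.Perm.eq_of_pairwise (fun a b _ _ h1 h2 => absurd h2 (not_lt.2 h1.le))
    sorted1 sorted3
    ((List.perm_ext_iff_of_nodup (sorted1.nodup) (sorted3.nodup)).2 hmem)

-- the triple-accumulator loop is three independent loops
theorem pv_fold_split (values : List Int) (L : List Int) (r g b : List Int) :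
    L.foldl (fun (acc : List Int × List Int × List Int) i =>
      if i == 0 || PySem.Int.mod i 3 == 0 then
        (acc.1 ++ [PySem.List.pyGetD values i 0],
         acc.2.1 ++ [PySem.List.pyGetD values (i + 1) 0],
         acc.2.2 ++ [PySem.List.pyGetD values (i + 2) 0])
      else acc) (r, g, b)
    = (L.foldl (fun l i => if i == 0 || PySem.Int.mod i 3 == 0 then l ++ [PySem.List.pyGetD values i 0] else l) r,
       L.foldl (fun l i => if i == 0 || PySem.Int.mod i 3 == 0 then l ++ [PySem.List.pyGetD values (i + 1) 0] else l) g,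
       L.foldl (fun l i => if i == 0 || PySem.Int.mod i 3 == 0 then l ++ [PySem.List.pyGetD values (i + 2) 0] else l) b) := by
  induction L generalizing r g b with
  | nil => rfl
  | cons x xs ih =>
    simp only [List.foldl_cons]
    split_ifs with h <;> exact ih _ _ _

-- one chunk read: values[i:i+3][j] = values[i+j] for an in-range triple start i
theorem pv_chunk (values : List Int) (hpre : values.length % 3 = 0) (i j : Int)
    (hi : i ∈ PySem.List.pyRange 0 (values.length : Int) 3)
    (hj0 : 0 ≤ j) (hj3 : j < 3) :
    PySem.List.pyGetD (PySem.List.slice values (some i) (some (i + 3))) j 0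
      = PySem.List.pyGetD values (i + j) 0 := by
  rw [PySem.List.mem_pyRange_iff_of_pos (by norm_num)] at hi
  obtain ⟨h0, hlt, hdvd⟩ := hi
  simp only [sub_zero] at hdvd
  have hle : i + 3 ≤ (values.length : Int) := by omega
  have hk : i = ((i.toNat : Nat) : Int) := by omega
  have h3 : ((3 : Nat) : Int) = (3 : Int) := by norm_num
  rw [hk, ← h3, PySem.List.slice_natCast_add values i.toNat 3]
  have hlen : ((values.drop i.toNat).take 3).length = 3 := by
    simp [List.length_take, List.length_drop]; omega
  rw [PySem.List.pyGetD_eq_getElem _ 0 hj0 (by rw [hlen]; omega),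
      PySem.List.pyGetD_eq_getElem _ 0 (by omega) (by omega)]
  rw [List.getElem_take, List.getElem_drop]
  congr 1
  omega

-- ===== VERDICT (by name: the statement is the Claim_ definition above) =====
theorem structure_py_spec : Claim_equal_structure_py := by
  intro values _ hpre
  unfold Spec_structure_py structure_py structure_py_alt
  rw [pv_fold_split, PySem.List.foldl_append_if, PySem.List.foldl_append_if,
      PySem.List.foldl_append_if, pv_filter_range]
  simp only [List.nil_append, List.map_map]
  refine Prod.ext ?_ (Prod.ext ?_ ?_) <;>
    · refine (List.map_congr_left ?_).symm
      intro i hi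
      simp only [Function.comp]
      first
      | exact (by simpa using pv_chunk values hpre i 0 hi (by norm_num) (by norm_num))
      | exact pv_chunk values hpre i 1 hi (by norm_num) (by norm_num)
      | exact pv_chunk values hpre i 2 hi (by norm_num) (by norm_num)
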